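-- pv_equiv track=rewrite | github.com/xyzHooDlEzyx/algo_labs | src/max_words_chain.py | max_chain_length
-- ===== SOURCE A (Python) =====
-- def max_chain_length(word_list):
--     """
--     counts max chain length
--     """
--     word_list.sort(key=len)
--     dp = {}
--
--     max_length = 1
--
--     for word in word_list:
--         dp[word] = 1
--         for i in range(len(word)):
--             prev = word[:i] + word[i + 1:]
--             if prev in word_list:
--                 dp[word] = max(dp[word], dp[prev] + 1)
--         max_length = max(max_length, dp[word])
--
--     return max_length
-- ===== SOURCE B (Python) =====
-- def max_chain_length(word_list):
--     """
--     counts max chain length (top-down memoized version)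
--     """
--     word_list.sort(key=len)  # kept only for side-effect parity with the original
--     words = set(word_list)
--     cache = {}
--
--     def best(word):
--         if word in cache:
--             return cache[word]
--         best_len = 1
--         for i in range(len(word)):
--             prev = word[:i] + word[i + 1:]
--             if prev in words:
--                 best_len = max(best_len, best(prev) + 1)
--         cache[word] = best_len
--         return best_len
--
--     return max((best(w) for w in word_list), default=1)
-- ===== Notes on version B (the rewrite author's own statement) =====
-- stated objective: faster
-- what changed: Replaces the bottom-up dp loop over the sorted list (with an O(n) 'prev in word_list' list scan per deletion) by top-down memoized recursion over the deletion structure with an O(1) set membership test; the in-place sort is kept only for side-effect parity.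
import Mathlib
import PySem

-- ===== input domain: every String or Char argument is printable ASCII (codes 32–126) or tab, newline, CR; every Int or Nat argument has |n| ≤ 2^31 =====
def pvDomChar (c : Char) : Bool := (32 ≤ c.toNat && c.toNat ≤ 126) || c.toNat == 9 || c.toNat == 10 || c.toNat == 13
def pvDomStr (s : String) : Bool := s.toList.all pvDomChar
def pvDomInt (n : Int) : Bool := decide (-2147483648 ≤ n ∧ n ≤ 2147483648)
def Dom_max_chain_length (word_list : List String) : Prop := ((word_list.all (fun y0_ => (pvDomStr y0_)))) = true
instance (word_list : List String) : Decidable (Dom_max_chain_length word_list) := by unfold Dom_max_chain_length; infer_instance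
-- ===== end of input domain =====

-- B replaces A's bottom-up dp loop (with a linear 'prev in word_list' scan) by top-down memoized
-- recursion over the deletion structure with a set for membership (objective: faster).
-- A sorts word_list in place; B keeps that sort, so both mutate the argument identically;
-- the equivalence proved here is about the return value.

-- word[:i] + word[i+1:] — exact: Str slices are Chars.slice on toList, '+' on str is append
def pvDel (w : String) (i : Int) : String :=
  String.ofList (PySem.Chars.slice w.toList none (some i) ++ PySem.Chars.slice w.toList (some (i + 1)) none)

-- ===== PORT A =====
def max_chain_length (word_list : List String) : Int :=
  let ws := PySem.List.sorted word_list (fun w => PySem.Str.len w)   -- word_list.sort(key=len)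
  (ws.foldl (fun (st : PySem.Dict String Int × Int) word =>
      let dp := (PySem.List.pyRange 0 (PySem.Str.len word) 1).foldl (fun dp i =>
          let prev := pvDel word i
          if ws.contains prev then
            -- dp[word] and dp[prev] exist here (word just inserted; prev is shorter, hence
            -- already processed in the length-sorted order), so getD _ 0 is exact
            dp.insert word (max (dp.getD word 0) (dp.getD prev 0 + 1))
          else dp) (st.1.insert word 1)
      (dp, max st.2 (dp.getD word 0)))
    (PySem.Dict.empty, 1)).2

-- ===== PORT B =====
-- best(word) with cache threaded through; fuel = |word| + 1 bounds the recursion depth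
-- (each recursive call is on a word one char shorter), so the fuel-0 branch is unreachable
def pvBest (words : PySem.Set String) (fuel : Nat) (cache : PySem.Dict String Int)
    (word : String) : Int × PySem.Dict String Int :=
  match cache.get? word with
  | some v => (v, cache)
  | none =>
    match fuel with
    | 0 => (1, cache)
    | n + 1 =>
      let p := (PySem.List.pyRange 0 (PySem.Str.len word) 1).foldl
        (fun (p : Int × PySem.Dict String Int) i =>
          let prev := pvDel word i
          if PySem.Set.contains words prev then
            let r := pvBest words n p.2 prev
            (max p.1 (r.1 + 1), r.2)
          else p) (1, cache)
      (p.1, p.2.insert word p.1)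

def max_chain_length_alt (word_list : List String) : Int :=
  let ws := PySem.List.sorted word_list (fun w => PySem.Str.len w)   -- word_list.sort(key=len)
  let words := PySem.Set.ofList ws                                   -- set(word_list)
  let p := ws.foldl (fun (p : List Int × PySem.Dict String Int) w =>
      let r := pvBest words (w.toList.length + 1) p.2 w
      (p.1 ++ [r.1], r.2)) ([], PySem.Dict.empty)
  (PySem.List.max? p.1 (fun v => v)).getD 1                          -- max(gen, default=1)

-- ===== PRECONDITION & SPEC =====
def Spec_max_chain_length (word_list : List String) (out : Int) : Prop := out = max_chain_length_alt word_list
instance (word_list : List String) (out : Int) : Decidable (Spec_max_chain_length word_list out) := by unfold Spec_max_chain_length; infer_instance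

-- ===== CLAIM (what is proved, stated in full; the proofs are below) =====
def Claim_equal_max_chain_length : Prop := ∀ (word_list : List String), Dom_max_chain_length word_list → Spec_max_chain_length word_list (max_chain_length word_list)

-- ===== LEMMAS AND PROOFS =====

-- the common mathematical value: chain length of w with predecessors drawn from S (fuel-indexed)
def pvChain (S : PySem.Set String) : Nat → String → Int
  | 0, _ => 1
  | n + 1, w =>
    (PySem.List.pyRange 0 (PySem.Str.len w) 1).foldl
      (fun a i => if PySem.Set.contains S (pvDel w i) then max a (pvChain S n (pvDel w i) + 1) else a) 1

def pvChainLen (S : PySem.Set String) (w : String) : Int := pvChain S w.toList.length w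

def pvCacheOK (S : PySem.Set String) (c : PySem.Dict String Int) : Prop :=
  ∀ u v, c.get? u = some v → v = pvChainLen S u

lemma pvDel_length (w : String) (i : Int) (h : i ∈ PySem.List.pyRange 0 (PySem.Str.len w) 1) :
    (pvDel w i).toList.length = w.toList.length - 1 ∧ 1 ≤ w.toList.length := by
  rw [PySem.Str.len_eq, PySem.List.mem_pyRange_one] at h
  obtain ⟨h0, h1⟩ := h
  have hk : i = ((i.toNat : Nat) : Int) := (Int.toNat_of_nonneg h0).symm
  have hk1 : i + 1 = ((i.toNat + 1 : Nat) : Int) := by omega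
  have hlt : i.toNat < w.toList.length := by omega
  refine ⟨?_, by omega⟩
  simp only [pvDel, String.toList_ofList, PySem.Chars.slice_eq_listSlice]
  rw [hk1, hk, PySem.List.slice_to_natCast, PySem.List.slice_from_natCast]
  rw [List.length_append, List.length_take, List.length_drop]
  omega

lemma pvRange_nil (w : String) (h : w.toList.length = 0) :
    PySem.List.pyRange 0 (PySem.Str.len w) 1 = [] := by
  rw [PySem.Str.len_eq, h]
  decide

lemma pvChain_len_zero (S : PySem.Set String) (n : Nat) (w : String) (h : w.toList.length = 0) :
    pvChain S n w = 1 := by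
  cases n with
  | zero => rfl
  | succ n => rw [pvChain, pvRange_nil w h]; rfl

lemma pvChain_fuel (S : PySem.Set String) : ∀ (m n : Nat) (w : String),
    w.toList.length ≤ m → w.toList.length ≤ n → pvChain S m w = pvChain S n w := by
  intro m
  induction m with
  | zero =>
    intro n w hm _
    rw [pvChain_len_zero S 0 w (by omega), pvChain_len_zero S n w (by omega)]
  | succ m ih =>
    intro n w hm hn
    cases n with
    | zero => rw [pvChain_len_zero S _ w (by omega), pvChain_len_zero S 0 w (by omega)]
    | succ n' =>
      rw [pvChain, pvChain]
      apply PySem.List.foldl_congr_mem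
      intro acc i hi
      obtain ⟨hlen, hpos⟩ := pvDel_length w i hi
      rw [ih n' (pvDel w i) (by omega) (by omega)]

lemma pvFoldMax_le (g : Int → Int) (P : Int → Bool) : ∀ (is : List Int) (a : Int),
    a ≤ is.foldl (fun a i => if P i then max a (g i) else a) a := by
  intro is
  induction is with
  | nil => intro a; exact le_refl a
  | cons i is ih =>
    intro a
    rw [List.foldl_cons]
    refine le_trans ?_ (ih _)
    split
    · exact le_max_left _ _
    · exact le_refl a

lemma one_le_pvChain (S : PySem.Set String) (n : Nat) (w : String) : 1 ≤ pvChain S n w := by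
  cases n with
  | zero => exact le_refl 1
  | succ n => exact pvFoldMax_le _ _ _ 1

lemma one_le_pvChainLen (S : PySem.Set String) (w : String) : 1 ≤ pvChainLen S w :=
  one_le_pvChain S _ w

-- pvChainLen as one pass of the range fold (the shared shape of both programs' inner loops)
lemma pvChainLen_eq_fold (S : PySem.Set String) (w : String) :
    pvChainLen S w = (PySem.List.pyRange 0 (PySem.Str.len w) 1).foldl
      (fun a i => if PySem.Set.contains S (pvDel w i) then max a (pvChainLen S (pvDel w i) + 1) else a) 1 := by
  unfold pvChainLen
  cases hl : w.toList.length with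
  | zero => rw [pvChain_len_zero S 0 w hl, pvRange_nil w hl]; rfl
  | succ m =>
    rw [pvChain]
    apply PySem.List.foldl_congr_mem
    intro acc i hi
    obtain ⟨hlen, hpos⟩ := pvDel_length w i hi
    rw [pvChain_fuel S m (pvDel w i).toList.length (pvDel w i) (by omega) (by omega)]

-- Python's 'prev in word_list' and 'prev in words' agree (same elements)
lemma pvContains_eq (ws : List String) (x : String) :
    ws.contains x = PySem.Set.contains (PySem.Set.ofList ws) x := by
  simp [pysem]

-- A's inner loop computes the chain fold for the current word and touches no other key
lemma pvA_inner (ws : List String) (w : String) :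
    ∀ (is : List Int) (dp : PySem.Dict String Int),
      (∀ i ∈ is, i ∈ PySem.List.pyRange 0 (PySem.Str.len w) 1) →
      (∀ u ∈ ws, u.toList.length < w.toList.length → dp.getD u 0 = pvChainLen (PySem.Set.ofList ws) u) →
      (is.foldl (fun dp i =>
          let prev := pvDel w i
          if ws.contains prev then dp.insert w (max (dp.getD w 0) (dp.getD prev 0 + 1)) else dp) dp).getD w 0
        = is.foldl (fun a i => if PySem.Set.contains (PySem.Set.ofList ws) (pvDel w i) then
            max a (pvChainLen (PySem.Set.ofList ws) (pvDel w i) + 1) else a) (dp.getD w 0)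
      ∧ ∀ u, u ≠ w → (is.foldl (fun dp i =>
          let prev := pvDel w i
          if ws.contains prev then dp.insert w (max (dp.getD w 0) (dp.getD prev 0 + 1)) else dp) dp).getD u 0
          = dp.getD u 0 := by
  intro is
  induction is with
  | nil => intro dp _ _; exact ⟨rfl, fun u _ => rfl⟩
  | cons i is ih =>
    intro dp hIs hdp
    have hi : i ∈ PySem.List.pyRange 0 (PySem.Str.len w) 1 := hIs i (List.mem_cons_self ..)
    simp only [List.foldl_cons]
    by_cases hc : ws.contains (pvDel w i) = true
    · have hmem : pvDel w i ∈ ws := by rwa [List.contains_iff_mem] at hc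
      have hSc : PySem.Set.contains (PySem.Set.ofList ws) (pvDel w i) = true := by
        rw [← pvContains_eq]; exact hc
      obtain ⟨hlen, hpos⟩ := pvDel_length w i hi
      have hne : pvDel w i ≠ w := by
        intro he; rw [he] at hlen; omega
      have hprev : dp.getD (pvDel w i) 0 = pvChainLen (PySem.Set.ofList ws) (pvDel w i) :=
        hdp _ hmem (by omega)
      simp only [hc, hSc, if_true]
      set v := max (dp.getD w 0) (dp.getD (pvDel w i) 0 + 1) with hv
      have hdp1 : ∀ u ∈ ws, u.toList.length < w.toList.length →
          (dp.insert w v).getD u 0 = pvChainLen (PySem.Set.ofList ws) u := by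
        intro u hu hul
        rw [PySem.Dict.getD_insert]
        rw [if_neg (by intro he; rw [he] at hul; omega)]
        exact hdp u hu hul
      obtain ⟨h1, h2⟩ := ih (dp.insert w v) (fun j hj => hIs j (List.mem_cons_of_mem _ hj)) hdp1
      constructor
      · rw [h1]
        congr 1
        rw [PySem.Dict.getD_insert, if_pos rfl, hv, hprev]
      · intro u hu
        rw [h2 u hu, PySem.Dict.getD_insert, if_neg hu]
    · have hSc : PySem.Set.contains (PySem.Set.ofList ws) (pvDel w i) = false := by
        rw [← pvContains_eq]; exact Bool.not_eq_true _ ▸ (by simpa using hc)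
      simp only [hc, hSc, if_false, Bool.false_eq_true]
      exact ih dp (fun j hj => hIs j (List.mem_cons_of_mem _ hj)) hdp

-- A's outer loop: over the length-sorted list, the running max is the max of chain lengths
lemma pvA_outer (ws : List String)
    (hsort : ws.Pairwise (fun a b => a.toList.length ≤ b.toList.length)) :
    ∀ (rest pre : List String) (dp : PySem.Dict String Int) (m : Int),
      ws = pre ++ rest →
      (∀ u ∈ pre, dp.getD u 0 = pvChainLen (PySem.Set.ofList ws) u) →
      (rest.foldl (fun (st : PySem.Dict String Int × Int) word =>
          let dp := (PySem.List.pyRange 0 (PySem.Str.len word) 1).foldl (fun dp i =>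
              let prev := pvDel word i
              if ws.contains prev then dp.insert word (max (dp.getD word 0) (dp.getD prev 0 + 1)) else dp)
            (st.1.insert word 1)
          (dp, max st.2 (dp.getD word 0))) (dp, m)).2
        = rest.foldl (fun a u => max a (pvChainLen (PySem.Set.ofList ws) u)) m := by
  intro rest
  induction rest with
  | nil => intro pre dp m _ _; rfl
  | cons w rest ih =>
    intro pre dp m heq hdp
    simp only [List.foldl_cons]
    have hdp1 : ∀ u ∈ ws, u.toList.length < w.toList.length →
        (dp.insert w 1).getD u 0 = pvChainLen (PySem.Set.ofList ws) u := by
      intro u hu hul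
      have hne : u ≠ w := by intro he; rw [he] at hul; omega
      rw [PySem.Dict.getD_insert, if_neg hne]
      apply hdp
      -- u must lie in pre: anything in w :: rest has length ≥ |w|
      rw [heq] at hu hsort
      rcases List.mem_append.mp hu with h | h
      · exact h
      · exfalso
        rcases List.mem_cons.mp h with h | h
        · rw [h] at hul; omega
        · have := (List.pairwise_append.mp hsort).2.1
          have hge := (List.pairwise_cons.mp this).1 u h
          omega
    obtain ⟨h1, h2⟩ := pvA_inner ws w (PySem.List.pyRange 0 (PySem.Str.len w) 1)
      (dp.insert w 1) (fun i hi => hi) hdp1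
    have hgd1 : (dp.insert w 1).getD w 0 = 1 := by
      rw [PySem.Dict.getD_insert, if_pos rfl]
    have hchain : ((PySem.List.pyRange 0 (PySem.Str.len w) 1).foldl (fun dp i =>
          let prev := pvDel w i
          if ws.contains prev then dp.insert w (max (dp.getD w 0) (dp.getD prev 0 + 1)) else dp)
        (dp.insert w 1)).getD w 0 = pvChainLen (PySem.Set.ofList ws) w := by
      rw [h1, hgd1, ← pvChainLen_eq_fold]
    rw [ih (pre ++ [w]) _ (max m _) (by rw [heq]; simp) ?_]
    · rw [hchain]
    · intro u hu
      by_cases hue : u = w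
      · rw [hue, hchain]
      · rw [h2 u hue, PySem.Dict.getD_insert, if_neg hue]
        exact hdp u (by rcases List.mem_append.mp hu with h | h; exact h; simp at h; exact absurd h hue)

-- B's inner loop computes the same chain fold while keeping the cache correct
lemma pvB_inner (S : PySem.Set String) (n : Nat) (w : String)
    (ih : ∀ (w' : String) (c : PySem.Dict String Int), w'.toList.length < n → pvCacheOK S c →
      (pvBest S n c w').1 = pvChainLen S w' ∧ pvCacheOK S (pvBest S n c w').2)
    (hw : w.toList.length ≤ n) :
    ∀ (is : List Int) (p : Int × PySem.Dict String Int),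
      (∀ i ∈ is, i ∈ PySem.List.pyRange 0 (PySem.Str.len w) 1) → pvCacheOK S p.2 →
      (is.foldl (fun (p : Int × PySem.Dict String Int) i =>
          let prev := pvDel w i
          if PySem.Set.contains S prev then
            let r := pvBest S n p.2 prev
            (max p.1 (r.1 + 1), r.2)
          else p) p).1
        = is.foldl (fun a i => if PySem.Set.contains S (pvDel w i) then
            max a (pvChainLen S (pvDel w i) + 1) else a) p.1
      ∧ pvCacheOK S (is.foldl (fun (p : Int × PySem.Dict String Int) i =>
          let prev := pvDel w i
          if PySem.Set.contains S prev then
            let r := pvBest S n p.2 prev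
            (max p.1 (r.1 + 1), r.2)
          else p) p).2 := by
  intro is
  induction is with
  | nil => intro p _ hc; exact ⟨rfl, hc⟩
  | cons i is ihl =>
    intro p hIs hc
    have hi := hIs i (List.mem_cons_self ..)
    obtain ⟨hlen, hpos⟩ := pvDel_length w i hi
    simp only [List.foldl_cons]
    by_cases hSc : PySem.Set.contains S (pvDel w i) = true
    · simp only [hSc, if_true]
      obtain ⟨hr1, hr2⟩ := ih (pvDel w i) p.2 (by omega) hc
      obtain ⟨g1, g2⟩ := ihl (max p.1 ((pvBest S n p.2 (pvDel w i)).1 + 1), (pvBest S n p.2 (pvDel w i)).2)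
        (fun j hj => hIs j (List.mem_cons_of_mem _ hj)) hr2
      exact ⟨by rw [g1, hr1], g2⟩
    · rw [Bool.not_eq_true] at hSc
      simp only [hSc, Bool.false_eq_true, if_false]
      exact ihl p (fun j hj => hIs j (List.mem_cons_of_mem _ hj)) hc

-- pvBest with enough fuel returns the chain length and keeps the cache correct
lemma pvB_best (S : PySem.Set String) : ∀ (fuel : Nat) (w : String) (c : PySem.Dict String Int),
    w.toList.length < fuel → pvCacheOK S c →
    (pvBest S fuel c w).1 = pvChainLen S w ∧ pvCacheOK S (pvBest S fuel c w).2 := by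
  intro fuel
  induction fuel with
  | zero => intro w c h _; omega
  | succ n ih =>
    intro w c hlt hc
    cases hg : c.get? w with
    | some v =>
      have hv := hc w v hg
      constructor
      · rw [pvBest, hg, hv]
      · rw [pvBest, hg]; exact hc
    | none =>
      obtain ⟨h1, h2⟩ := pvB_inner S n w (fun w' c' h hc' => ih w' c' h hc') (by omega)
        (PySem.List.pyRange 0 (PySem.Str.len w) 1) (1, c) (fun i hi => hi) hc
      rw [pvBest, hg]
      constructor
      · simp only
        rw [h1, ← pvChainLen_eq_fold]
      · simp only
        intro u v hu
        rw [PySem.Dict.get?_insert] at hu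
        split at hu
        · rename_i hue
          rw [hue]
          injection hu with hu
          rw [← hu, h1, ← pvChainLen_eq_fold]
        · exact h2 u v hu

-- B's outer loop collects exactly the chain lengths, in list order
lemma pvB_outer (S : PySem.Set String) : ∀ (rest : List String) (p : List Int × PySem.Dict String Int),
    pvCacheOK S p.2 →
    (rest.foldl (fun (p : List Int × PySem.Dict String Int) w =>
        let r := pvBest S (w.toList.length + 1) p.2 w
        (p.1 ++ [r.1], r.2)) p).1 = p.1 ++ rest.map (pvChainLen S) := by
  intro rest
  induction rest with
  | nil => intro p _; simp
  | cons w rest ih =>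
    intro p hc
    obtain ⟨h1, h2⟩ := pvB_best S (w.toList.length + 1) w p.2 (by omega) hc
    simp only [List.foldl_cons, List.map_cons]
    rw [ih _ h2, h1]
    simp

-- max(values, default=1) of the chain lengths is A's running max (all values are ≥ 1)
lemma pvGlue (S : PySem.Set String) (ws : List String) :
    (PySem.List.max? (ws.map (pvChainLen S)) (fun v => v)).getD 1
      = ws.foldl (fun a u => max a (pvChainLen S u)) 1 := by
  cases ws with
  | nil => rfl
  | cons x t =>
    rw [List.map_cons, PySem.List.max?_id_cons, Option.getD_some, List.foldl_cons,
      max_eq_right (one_le_pvChainLen S x), List.foldl_map]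

-- ===== VERDICT (by name: the statement is the Claim_ definition above) =====
theorem max_chain_length_spec : Claim_equal_max_chain_length := by
  intro wl _
  unfold Spec_max_chain_length max_chain_length max_chain_length_alt
  simp only []
  set ws := PySem.List.sorted wl (fun w => PySem.Str.len w) with hws
  have hsort : ws.Pairwise (fun a b => a.toList.length ≤ b.toList.length) := by
    have := PySem.List.sorted_pairwise wl (fun w => PySem.Str.len w)
    refine this.imp ?_
    intro a b h
    rw [PySem.Str.len_eq, PySem.Str.len_eq] at h
    exact_mod_cast h
  have hA := pvA_outer ws hsort ws [] PySem.Dict.empty 1 rfl (by intro u hu; simp at hu)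
  have hB := pvB_outer (PySem.Set.ofList ws) ws ([], PySem.Dict.empty)
    (by intro u v hu; rw [PySem.Dict.get?_empty] at hu; exact absurd hu (by simp))
  rw [hA, hB, List.nil_append, pvGlue]
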